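-- pv_equiv track=rewrite | github.com/tudormihaita/cxr-report-gen | data/datasets.py | _build_text_image_mappings
-- ===== SOURCE A (Python) =====
-- from collections import defaultdict
--
-- def _build_text_image_mappings(reports, uids):
--     """
--     Create a mapping between semantically identical reports and their corresponding imaging studies.
--     This helps in computing retrieval metrics.
--     :param reports: list of text reports, one for each sample
--     :param uids: list of unique identifiers for the images
--     :return: dicts mapping image index to list of matching text indices and vice versa
--     """
--     report_to_images = defaultdict(list)
--
--     for uid, report in zip(uids, reports):
--         report = report.strip().lower()
--         report_to_images[report].append(uid)
--
--     img2txt = dict()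
--     txt2img = dict()
--
--     for uid, report in zip(uids, reports):
--         report = report.strip().lower()
--         matching_uids = report_to_images[report]
--
--         img2txt[uid] = matching_uids
--         txt2img[uid] = uid
--
--     return img2txt, txt2img
-- ===== SOURCE B (Python) =====
-- def _build_text_image_mappings(reports, uids):
--     report_to_images = {}
--     img2txt = {}
--     txt2img = {}
--     for uid, report in zip(uids, reports):
--         key = report.strip().lower()
--         bucket = report_to_images.setdefault(key, [])
--         bucket.append(uid)
--         # bucket is shared: it keeps growing as later matching samples arrive,
--         # so after the loop every img2txt entry holds the full group.
--         img2txt[uid] = bucket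
--         txt2img[uid] = uid
--     return img2txt, txt2img
-- ===== Notes on version B (the rewrite author's own statement) =====
-- stated objective: simpler
-- what changed: B replaces A's two passes (group, then re-zip and re-normalize every report to look each group up again) by ONE pass that normalizes each report once and fills all three dicts together, storing the shared group bucket in img2txt as it grows.
import Mathlib
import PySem

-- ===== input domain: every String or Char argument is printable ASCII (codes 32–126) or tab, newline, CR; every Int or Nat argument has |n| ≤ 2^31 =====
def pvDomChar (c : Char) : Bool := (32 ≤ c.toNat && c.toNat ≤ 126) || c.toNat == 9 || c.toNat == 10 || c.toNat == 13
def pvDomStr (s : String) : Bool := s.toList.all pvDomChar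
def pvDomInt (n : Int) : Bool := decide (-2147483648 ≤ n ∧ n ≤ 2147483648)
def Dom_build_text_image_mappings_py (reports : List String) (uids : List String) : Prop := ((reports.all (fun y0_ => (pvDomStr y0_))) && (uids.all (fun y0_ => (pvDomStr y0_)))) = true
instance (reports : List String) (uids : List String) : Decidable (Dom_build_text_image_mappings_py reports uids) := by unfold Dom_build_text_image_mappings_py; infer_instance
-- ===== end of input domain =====

-- B is simpler: a SINGLE pass that builds all three dicts at once, storing each uid's shared
-- group bucket directly instead of re-scanning and re-normalizing the inputs in a second loop.

-- ===== PORT A =====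
-- literal port of _build_text_image_mappings: loop 1 fills a defaultdict(list),
-- loop 2 re-normalizes each report and fills img2txt/txt2img in one pass.
def build_text_image_mappings_py (reports : List String) (uids : List String) :
    (List (String × List String)) × (List (String × String)) :=
  let report_to_images : PySem.Dict String (List String) :=
    (uids.zip reports).foldl
      (fun d p =>
        let report := PySem.Str.lower (PySem.Str.strip p.2)
        d.insert report (d.getD report [] ++ [p.1]))   -- report_to_images[report].append(uid)
      PySem.Dict.empty
  let st :=
    (uids.zip reports).foldl
      (fun (st : PySem.Dict String (List String) × PySem.Dict String String) p =>
        let report := PySem.Str.lower (PySem.Str.strip p.2)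
        let matching_uids := report_to_images.getD report []
        (st.1.insert p.1 matching_uids, st.2.insert p.1 p.1))
      (PySem.Dict.empty, PySem.Dict.empty)
  (st.1.items, st.2.items)

-- ===== PORT B =====
-- literal port of Source B: ONE fold over zip(uids, reports) carrying (report_to_images, img2txt, txt2img).
-- `bucket = report_to_images.setdefault(key, []); bucket.append(uid)` is Dict.modify key [] (· ++ [uid])
-- (exact: setdefault-then-append is one in-place update of that entry). `img2txt[uid] = bucket` stores the
-- SHARED list object; sharing is modelled by recording the bucket's key and reading the final contents off
-- the finished group dict at the end (exact: a key's bucket object never changes identity in Source B).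
def build_text_image_mappings_py_alt (reports : List String) (uids : List String) :
    (List (String × List String)) × (List (String × String)) :=
  let st :=
    (uids.zip reports).foldl
      (fun (st : PySem.Dict String (List String) × PySem.Dict String String × PySem.Dict String String) p =>
        let key := PySem.Str.lower (PySem.Str.strip p.2)
        (st.1.modify key [] (· ++ [p.1]),
         st.2.1.insert p.1 key,
         st.2.2.insert p.1 p.1))
      (PySem.Dict.empty, PySem.Dict.empty, PySem.Dict.empty)
  (st.2.1.items.map (fun q => (q.1, st.1.getD q.2 [])), st.2.2.items)

-- ===== PRECONDITION & SPEC =====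
def Spec_build_text_image_mappings_py (reports : List String) (uids : List String) (out : (List (String × List String)) × (List (String × String))) : Prop := out = build_text_image_mappings_py_alt reports uids
instance (reports : List String) (uids : List String) (out : (List (String × List String)) × (List (String × String))) : Decidable (Spec_build_text_image_mappings_py reports uids out) := by unfold Spec_build_text_image_mappings_py; infer_instance

-- ===== CLAIM (what is proved, stated in full; the proofs are below) =====
def Claim_equal_build_text_image_mappings_py : Prop := ∀ (reports : List String) (uids : List String), Dom_build_text_image_mappings_py reports uids → Spec_build_text_image_mappings_py reports uids (build_text_image_mappings_py reports uids)

-- ===== LEMMAS AND PROOFS =====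

-- dereferencing B's stored bucket keys through the final group dict yields exactly
-- A's img2txt pass, which inserts the dereferenced value directly
theorem pv_deref (F : String → List String) (key : String → String)
    (l : List (String × String))
    (d1 : PySem.Dict String String) (d2 : PySem.Dict String (List String))
    (h : d2.items = d1.items.map (fun q => (q.1, F q.2))) :
    ((l.foldl (fun d p => d.insert p.1 (key p.2)) d1).items).map (fun q => (q.1, F q.2))
      = (l.foldl (fun d p => d.insert p.1 (F (key p.2))) d2).items := by
  induction l generalizing d1 d2 with
  | nil => exact h.symm
  | cons p l ih =>
    simp only [List.foldl]
    refine ih _ _ ?_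
    have hc2 : d2.contains p.1 = d1.contains p.1 := by
      simp [PySem.Dict.contains_eq_decide_mem_keys, PySem.Dict.keys, h]
    by_cases hc : d1.contains p.1 = true
    · rw [PySem.Dict.items_insert, PySem.Dict.items_insert, hc, hc2, hc, if_pos rfl, if_pos rfl, h]
      simp only [List.map_map]
      refine List.map_congr_left ?_
      intro q _
      by_cases hq : q.1 == p.1 <;> simp [Function.comp, hq]
    · rw [PySem.Dict.items_insert, PySem.Dict.items_insert, hc2,
          if_neg (by simpa using hc), if_neg (by simpa using hc), h]
      simp

-- proof-only abbreviations: the normalization key and A's first-pass grouping dict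
def pvKey (r : String) : String := PySem.Str.lower (PySem.Str.strip r)

def pvR2I (reports uids : List String) : PySem.Dict String (List String) :=
  (uids.zip reports).foldl
    (fun d p => d.insert (pvKey p.2) (d.getD (pvKey p.2) [] ++ [p.1])) PySem.Dict.empty

theorem build_text_image_mappings_py_eq (reports uids : List String) :
    build_text_image_mappings_py reports uids = build_text_image_mappings_py_alt reports uids := by
  unfold build_text_image_mappings_py build_text_image_mappings_py_alt
  -- split A's paired second pass into its two independent folds
  refine Eq.trans (congrArg
    (fun st : PySem.Dict String (List String) × PySem.Dict String String => (st.1.items, st.2.items))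
    (PySem.List.foldl_prod_mk
      (fun (d : PySem.Dict String (List String)) (p : String × String) =>
        d.insert p.1 ((pvR2I reports uids).getD (pvKey p.2) []))
      (fun (d : PySem.Dict String String) (p : String × String) => d.insert p.1 p.1)
      (uids.zip reports) PySem.Dict.empty PySem.Dict.empty)) ?_
  -- split B's triple fold into its three independent folds
  have h2 := PySem.List.foldl_prod_mk
    (fun (d : PySem.Dict String String) (p : String × String) => d.insert p.1 (pvKey p.2))
    (fun (d : PySem.Dict String String) (p : String × String) => d.insert p.1 p.1)
    (uids.zip reports) PySem.Dict.empty PySem.Dict.empty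
  have h1 := PySem.List.foldl_prod_mk
    (fun (d : PySem.Dict String (List String)) (p : String × String) =>
      d.modify (pvKey p.2) [] (· ++ [p.1]))
    (fun (s : PySem.Dict String String × PySem.Dict String String) (p : String × String) =>
      (s.1.insert p.1 (pvKey p.2), s.2.insert p.1 p.1))
    (uids.zip reports) PySem.Dict.empty (PySem.Dict.empty, PySem.Dict.empty)
  refine Eq.trans ?_ (congrArg
    (fun st : PySem.Dict String (List String) × PySem.Dict String String × PySem.Dict String String =>
      (st.2.1.items.map (fun q => (q.1, st.1.getD q.2 [])), st.2.2.items))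
    (h1.trans (congrArg (Prod.mk _) h2))).symm
  -- first components: B's key-then-dereference equals A's direct insertion; second: identical folds
  refine congrArg₂ Prod.mk ?_ rfl
  exact (pv_deref (fun k => (pvR2I reports uids).getD k []) pvKey (uids.zip reports)
    PySem.Dict.empty PySem.Dict.empty rfl).symm

-- ===== VERDICT (by name: the statement is the Claim_ definition above) =====
theorem build_text_image_mappings_py_spec : Claim_equal_build_text_image_mappings_py := by
  intro reports uids _
  unfold Spec_build_text_image_mappings_py
  exact build_text_image_mappings_py_eq reports uids
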